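-- pv_equiv track=rewrite | github.com/jgc128/Ghostwriter | scripts/ohhla_crawler.py | get_ohhla_artist_page
-- ===== SOURCE A (Python) =====
-- def get_ohhla_artist_page(artist):
--     ohhla_pages = [
--         { 'start': 'a', 'end': 'e', 'page': 'all.html' },
--         { 'start': 'f', 'end': 'j', 'page': 'all_two.html' },
--         { 'start': 'k', 'end': 'o', 'page': 'all_three.html' },
--         { 'start': 'p', 'end': 't', 'page': 'all_four.html' },
--         { 'start': 'u', 'end': 'z', 'page': 'all_five.html' },
--     ]
--
--
--     artist = artist[0].lower()
--     for cat in ohhla_pages: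
--         if artist >= cat['start'] and artist <= cat['end']:
--             return cat['page']
--
--     return ohhla_pages[0]['page']
-- ===== SOURCE B (Python) =====
-- def get_ohhla_artist_page(artist):
--     table = {}
--     for start, end, page in [('a', 'e', 'all.html'), ('f', 'j', 'all_two.html'),
--                              ('k', 'o', 'all_three.html'), ('p', 't', 'all_four.html'),
--                              ('u', 'z', 'all_five.html')]:
--         for c in range(ord(start), ord(end) + 1):
--             table[chr(c)] = page
--     return table.get(artist[0].lower(), 'all.html')
-- ===== Notes on version B (the rewrite author's own statement) =====
-- stated objective: idiomatic
-- what changed: B precomputes a dict mapping every lowercase letter a-z to its page (built from the five buckets) and answers with a single table.get(letter, 'all.html') lookup, instead of A's linear scan over range-comparison buckets.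
import Mathlib
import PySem

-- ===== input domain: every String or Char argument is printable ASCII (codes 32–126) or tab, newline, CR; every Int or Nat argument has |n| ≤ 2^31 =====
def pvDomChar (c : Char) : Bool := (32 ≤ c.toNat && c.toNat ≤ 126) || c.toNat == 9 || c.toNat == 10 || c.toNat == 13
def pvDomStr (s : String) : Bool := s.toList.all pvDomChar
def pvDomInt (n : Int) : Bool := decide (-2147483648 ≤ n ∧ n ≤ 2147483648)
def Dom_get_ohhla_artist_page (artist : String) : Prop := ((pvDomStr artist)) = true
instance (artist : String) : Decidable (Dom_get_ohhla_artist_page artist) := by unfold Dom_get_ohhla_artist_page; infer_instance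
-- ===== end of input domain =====

-- B builds a 26-entry letter→page dict once and does a single keyed lookup instead of A's
-- linear scan over five range buckets (idiomatic; same behaviour, return value only).

-- ===== PORT A =====
-- the five buckets: (start, end, page)
def pagesA : List (Char × Char × String) :=
  [('a','e',"all.html"), ('f','j',"all_two.html"), ('k','o',"all_three.html"),
   ('p','t',"all_four.html"), ('u','z',"all_five.html")]

-- the for-loop with early return: first bucket whose range contains the letter
def scanA : List (Char × Char × String) → Char → Option String
  | [], _ => none
  | (s, e, p) :: rest, a => if s ≤ a ∧ a ≤ e then some p else scanA rest a

def get_ohhla_artist_page (artist : String) : String :=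
  match PySem.Str.pyGet? artist 0 with          -- artist[0]: none = IndexError, excluded by Pre_
  | none => ""
  | some c =>
    let a := PySem.Chars.lowerChar c            -- .lower() of the 1-char string
    match scanA pagesA a with
    | some p => p
    | none =>                                    -- return ohhla_pages[0]['page']
      match PySem.List.pyGet? pagesA 0 with
      | some t => t.2.2
      | none => ""

-- ===== PORT B =====
def bucketsB : List (Char × Char × String) :=
  [('a','e',"all.html"), ('f','j',"all_two.html"), ('k','o',"all_three.html"),
   ('p','t',"all_four.html"), ('u','z',"all_five.html")]

-- table[chr(c)] = page for c in range(ord(start), ord(end)+1), bucket by bucket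
def tableB : PySem.Dict Char String :=
  bucketsB.foldl (fun d bep =>
    (PySem.List.pyRange bep.1.toNat (bep.2.1.toNat + 1) 1).foldl
      (fun d c => d.insert (Char.ofNat c.toNat) bep.2.2) d) PySem.Dict.empty

def get_ohhla_artist_page_alt (artist : String) : String :=
  match PySem.Str.pyGet? artist 0 with          -- artist[0]: none = IndexError, excluded by Pre_
  | none => ""
  | some c => tableB.getD (PySem.Chars.lowerChar c) "all.html"   -- table.get(letter, 'all.html')

-- ===== PRECONDITION & SPEC =====
-- Pre_ excludes only the empty string, on which both A and B raise IndexError (artist[0]).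
def Pre_get_ohhla_artist_page (artist : String) : Prop := artist ≠ ""
instance (artist : String) : Decidable (Pre_get_ohhla_artist_page artist) := by unfold Pre_get_ohhla_artist_page; infer_instance
def pvWitness_get_ohhla_artist_page : String := "Jay-Z"

def Spec_get_ohhla_artist_page (artist : String) (out : String) : Prop := out = get_ohhla_artist_page_alt artist
instance (artist : String) (out : String) : Decidable (Spec_get_ohhla_artist_page artist out) := by unfold Spec_get_ohhla_artist_page; infer_instance

-- ===== CLAIM (what is proved, stated in full; the proofs are below) =====
def Claim_equal_get_ohhla_artist_page : Prop := ∀ (artist : String), Dom_get_ohhla_artist_page artist → Pre_get_ohhla_artist_page artist → Spec_get_ohhla_artist_page artist (get_ohhla_artist_page artist)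

-- ===== LEMMAS AND PROOFS =====
-- the two ports after the artist[0] lookup succeeded, as functions of the first char
def fA (c : Char) : String :=
  let a := PySem.Chars.lowerChar c
  match scanA pagesA a with
  | some p => p
  | none =>
    match PySem.List.pyGet? pagesA 0 with
    | some t => t.2.2
    | none => ""
def fB (c : Char) : String := tableB.getD (PySem.Chars.lowerChar c) "all.html"

lemma key (c : Char) (h : c.toNat ≤ 126) : fA c = fB c := by
  have hmem : c ∈ (List.range 127).map Char.ofNat :=
    List.mem_map.2 ⟨c.toNat, List.mem_range.2 (by omega), Char.ofNat_toNat c⟩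
  have hall : ((List.range 127).map Char.ofNat).all (fun c => fA c == fB c) = true := by decide
  exact eq_of_beq (List.all_eq_true.1 hall c hmem)

-- ===== VERDICT (by name: the statement is the Claim_ definition above) =====
theorem get_ohhla_artist_page_spec : Claim_equal_get_ohhla_artist_page := by
  intro artist hdom hpre
  unfold Spec_get_ohhla_artist_page
  have hne : artist.toList ≠ [] := by
    intro hnil
    exact hpre (String.toList_eq_nil_iff.mp hnil)
  obtain ⟨c, cs, hl⟩ := List.exists_cons_of_ne_nil hne
  have hget : PySem.Str.pyGet? artist 0 = some c := by
    have := PySem.Str.pyGet?_natCast (s := artist) (n := 0)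
    simp [hl] at this ⊢
  have hdc : c.toNat ≤ 126 := by
    have hc : pvDomChar c = true := by
      have := List.all_eq_true.1 (by simpa [Dom_get_ohhla_artist_page, pvDomStr] using hdom) c
        (by rw [hl]; exact List.mem_cons_self)
      simpa using this
    simp only [pvDomChar, Bool.or_eq_true, Bool.and_eq_true, beq_iff_eq, decide_eq_true_eq] at hc
    omega
  show get_ohhla_artist_page artist = get_ohhla_artist_page_alt artist
  unfold get_ohhla_artist_page get_ohhla_artist_page_alt
  rw [hget]
  exact key c hdc
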